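-- pv_equiv track=rewrite | github.com/SpencerBelleau/stegodon | modules/funcs.py | encodeInModulo
-- ===== SOURCE A (Python) =====
-- def encodeInModulo(n, modVal, target): #Very simple, changes a number to have a given value when modulo-d with another number
-- 	if(not n%modVal == target):
-- 		if(n + modVal < 255): #normal mode
-- 			while(not n % modVal == target):
-- 				n = n + 1
-- 		else:
-- 			while(not n % modVal == target):
-- 				n = n - 1
-- 	return n
-- ===== SOURCE B (Python) =====
-- def encodeInModulo(n, modVal, target):
--     # Closed-form modular jump to the nearest n' with n' % modVal == target:
--     # upward when n + modVal < 255 (the "normal mode"), else downward.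
--     m = abs(modVal)
--     if n + modVal < 255:
--         return n + (target - n) % m
--     return n - (n - target) % m
-- ===== Notes on version B (the rewrite author's own statement) =====
-- stated objective: alternative
-- what changed: Replaces A's one-step-at-a-time while loops with a single closed-form modular-arithmetic jump ((target-n) mod |modVal| up, or (n-target) mod |modVal| down); Pre_ excludes modVal=0 (A raises ZeroDivisionError) and targets that are not a Python residue of modVal (A loops forever).
import Mathlib
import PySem

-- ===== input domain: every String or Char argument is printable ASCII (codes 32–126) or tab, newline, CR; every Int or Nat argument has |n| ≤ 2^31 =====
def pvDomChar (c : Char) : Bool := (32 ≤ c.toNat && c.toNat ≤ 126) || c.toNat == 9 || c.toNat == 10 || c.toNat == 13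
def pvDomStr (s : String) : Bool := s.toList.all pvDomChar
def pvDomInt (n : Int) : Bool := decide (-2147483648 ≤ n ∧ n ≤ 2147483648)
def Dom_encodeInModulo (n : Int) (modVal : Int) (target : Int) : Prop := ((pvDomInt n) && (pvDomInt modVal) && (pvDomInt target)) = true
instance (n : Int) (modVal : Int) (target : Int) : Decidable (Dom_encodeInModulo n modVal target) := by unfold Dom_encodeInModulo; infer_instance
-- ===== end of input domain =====

-- B changes A's step-by-one while loops into one closed-form modular jump; A's loops, ported
-- with fuel |modVal| that Pre_ makes sufficient, are proved equal to it.

-- ===== PORT A =====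
-- A's upward while loop 'while not n % modVal == target: n = n + 1', with fuel making it total
-- (inside Pre_ the match is found within |modVal| steps, so fuel modVal.natAbs never runs out).
def encodeInModuloUp (modVal target : Int) : Nat → Int → Int
  | 0, n => n
  | fuel + 1, n =>
      if PySem.Int.mod n modVal = target then n
      else encodeInModuloUp modVal target fuel (n + 1)

-- A's downward while loop 'while not n % modVal == target: n = n - 1'.
def encodeInModuloDown (modVal target : Int) : Nat → Int → Int
  | 0, n => n
  | fuel + 1, n =>
      if PySem.Int.mod n modVal = target then n
      else encodeInModuloDown modVal target fuel (n - 1)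

def encodeInModulo (n : Int) (modVal : Int) (target : Int) : Int :=
  if ¬ PySem.Int.mod n modVal = target then
    if n + modVal < 255 then encodeInModuloUp modVal target modVal.natAbs n
    else encodeInModuloDown modVal target modVal.natAbs n
  else n

-- ===== PORT B =====
def encodeInModulo_alt (n : Int) (modVal : Int) (target : Int) : Int :=
  let m := |modVal|
  if n + modVal < 255 then n + PySem.Int.mod (target - n) m
  else n - PySem.Int.mod (n - target) m

-- ===== PRECONDITION & SPEC =====
-- Pre_ excludes modVal = 0, where A raises ZeroDivisionError, and targets that are not a Python
-- residue modulo modVal, where A's while loop never terminates.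
def Pre_encodeInModulo (n : Int) (modVal : Int) (target : Int) : Prop :=
  modVal ≠ 0 ∧ PySem.Int.mod target modVal = target
instance (n : Int) (modVal : Int) (target : Int) : Decidable (Pre_encodeInModulo n modVal target) := by
  unfold Pre_encodeInModulo; infer_instance
def pvWitness_encodeInModulo : Int × Int × Int := (3, 5, 2)
def Spec_encodeInModulo (n : Int) (modVal : Int) (target : Int) (out : Int) : Prop := out = encodeInModulo_alt n modVal target
instance (n : Int) (modVal : Int) (target : Int) (out : Int) : Decidable (Spec_encodeInModulo n modVal target out) := by unfold Spec_encodeInModulo; infer_instance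

-- ===== CLAIM (what is proved, stated in full; the proofs are below) =====
def Claim_equal_encodeInModulo : Prop := ∀ (n : Int) (modVal : Int) (target : Int), Dom_encodeInModulo n modVal target → Pre_encodeInModulo n modVal target → Spec_encodeInModulo n modVal target (encodeInModulo n modVal target)

-- ===== LEMMAS AND PROOFS =====

-- Python's mod only depends on the argument modulo the divisor.
theorem pv_mod_congr (a c b : Int) (h : b ∣ a - c) :
    PySem.Int.mod a b = PySem.Int.mod c b := by
  rcases eq_or_ne b 0 with rfl | hb
  · obtain rfl : a = c := by obtain ⟨k, hk⟩ := h; omega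
    rfl
  · have ha := PySem.Int.floordiv_mul_add_mod a b
    have hc := PySem.Int.floordiv_mul_add_mod c b
    have hdvd : b ∣ PySem.Int.mod a b - PySem.Int.mod c b := by
      obtain ⟨k, hk⟩ := h
      exact ⟨k - (PySem.Int.floordiv a b - PySem.Int.floordiv c b), by linarith [hk]⟩
    have habs : |PySem.Int.mod a b - PySem.Int.mod c b| < |b| := by
      rcases lt_or_gt_of_ne hb with hneg | hpos
      · have h1 := PySem.Int.mod_neg_bounds (a := a) hneg
        have h2 := PySem.Int.mod_neg_bounds (a := c) hneg
        rw [abs_lt, abs_of_neg hneg]; omega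
      · have h1 := PySem.Int.mod_nonneg (a := a) hpos
        have h2 := PySem.Int.mod_lt (a := a) hpos
        have h3 := PySem.Int.mod_nonneg (a := c) hpos
        have h4 := PySem.Int.mod_lt (a := c) hpos
        rw [abs_lt, abs_of_pos hpos]; omega
    have h0 := Int.eq_zero_of_abs_lt_dvd ((abs_dvd _ _).mpr hdvd) habs
    omega

theorem pv_dvd_sub_mod (a b : Int) : b ∣ a - PySem.Int.mod a b :=
  ⟨PySem.Int.floordiv a b, by linarith [PySem.Int.floordiv_mul_add_mod a b]⟩

-- Under Pre_, 'n % modVal == target' is exactly divisibility of target - n by |modVal|.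
theorem pv_mod_iff (n modVal target : Int) (_hb : modVal ≠ 0)
    (ht : PySem.Int.mod target modVal = target) :
    PySem.Int.mod n modVal = target ↔ |modVal| ∣ (target - n) := by
  rw [abs_dvd]
  constructor
  · intro h
    have hd := pv_dvd_sub_mod n modVal
    rw [h] at hd
    exact (dvd_sub_comm).mp hd
  · intro h
    have := pv_mod_congr n target modVal ((dvd_sub_comm).mp h)
    rw [this, ht]

-- One decrement of the distance under Python-style emod by a positive modulus.
theorem pv_emod_step (x m : Int) (hm : 0 < m) (hx : x % m ≠ 0) :
    (x - 1) % m = x % m - 1 := by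
  have h1 := Int.emod_nonneg x (ne_of_gt hm)
  have h2 := Int.emod_lt_of_pos x hm
  have hm2 : 2 ≤ m := by omega
  have h1m : (1 : Int) % m = 1 := Int.emod_eq_of_lt (by omega) (by omega)
  rw [Int.sub_emod x 1 m, h1m]
  exact Int.emod_eq_of_lt (by omega) (by omega)

theorem pv_up_eq (modVal target : Int) (hb : modVal ≠ 0)
    (ht : PySem.Int.mod target modVal = target) :
    ∀ (fuel : Nat) (n : Int), (target - n) % |modVal| < (fuel : Int) →
      encodeInModuloUp modVal target fuel n = n + (target - n) % |modVal| := by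
  have hm : (0 : Int) < |modVal| := abs_pos.mpr hb
  intro fuel
  induction fuel with
  | zero =>
      intro n hlt
      have := Int.emod_nonneg (target - n) (ne_of_gt hm)
      simp only [Nat.cast_zero] at hlt
      omega
  | succ f ih =>
      intro n hlt
      by_cases h : PySem.Int.mod n modVal = target
      · have hd : (target - n) % |modVal| = 0 :=
          Int.emod_eq_zero_of_dvd ((pv_mod_iff n modVal target hb ht).mp h)
        simp [encodeInModuloUp, h, hd]
      · have hd : (target - n) % |modVal| ≠ 0 := fun h0 =>
          h ((pv_mod_iff n modVal target hb ht).mpr (Int.dvd_of_emod_eq_zero h0))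
        have hstep : (target - (n + 1)) % |modVal| = (target - n) % |modVal| - 1 := by
          have hs := pv_emod_step (target - n) |modVal| hm hd
          have he : target - (n + 1) = (target - n) - 1 := by ring
          rw [he]; exact hs
        have hih := ih (n + 1) (by rw [hstep]; push_cast at hlt ⊢; omega)
        simp only [encodeInModuloUp, h, if_false]
        rw [hih, hstep]; ring

theorem pv_down_eq (modVal target : Int) (hb : modVal ≠ 0)
    (ht : PySem.Int.mod target modVal = target) :
    ∀ (fuel : Nat) (n : Int), (n - target) % |modVal| < (fuel : Int) →
      encodeInModuloDown modVal target fuel n = n - (n - target) % |modVal| := by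
  have hm : (0 : Int) < |modVal| := abs_pos.mpr hb
  intro fuel
  induction fuel with
  | zero =>
      intro n hlt
      have := Int.emod_nonneg (n - target) (ne_of_gt hm)
      simp only [Nat.cast_zero] at hlt
      omega
  | succ f ih =>
      intro n hlt
      by_cases h : PySem.Int.mod n modVal = target
      · have hd : (n - target) % |modVal| = 0 := by
          apply Int.emod_eq_zero_of_dvd
          exact (dvd_sub_comm).mp ((pv_mod_iff n modVal target hb ht).mp h)
        simp [encodeInModuloDown, h, hd]
      · have hd : (n - target) % |modVal| ≠ 0 := fun h0 => by
          exact h ((pv_mod_iff n modVal target hb ht).mpr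
            ((dvd_sub_comm).mp (Int.dvd_of_emod_eq_zero h0)))
        have hstep : ((n - 1) - target) % |modVal| = (n - target) % |modVal| - 1 := by
          have hs := pv_emod_step (n - target) |modVal| hm hd
          have he : (n - 1) - target = (n - target) - 1 := by ring
          rw [he]; exact hs
        have hih := ih (n - 1) (by rw [hstep]; push_cast at hlt ⊢; omega)
        simp only [encodeInModuloDown, h, if_false]
        rw [hih, hstep]; ring

-- ===== VERDICT (by name: the statement is the Claim_ definition above) =====
theorem encodeInModulo_spec : Claim_equal_encodeInModulo := by
  intro n modVal target _ hpre
  obtain ⟨hb, ht⟩ := hpre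
  unfold Spec_encodeInModulo encodeInModulo encodeInModulo_alt
  have hm : (0 : Int) < |modVal| := abs_pos.mpr hb
  have hmodup : PySem.Int.mod (target - n) |modVal| = (target - n) % |modVal| :=
    PySem.Int.mod_eq_emod_of_pos hm
  have hmoddown : PySem.Int.mod (n - target) |modVal| = (n - target) % |modVal| :=
    PySem.Int.mod_eq_emod_of_pos hm
  have hfuel : ((modVal.natAbs : Nat) : Int) = |modVal| := Int.natCast_natAbs modVal
  by_cases h0 : PySem.Int.mod n modVal = target
  · have hdvd := (pv_mod_iff n modVal target hb ht).mp h0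
    have hu : (target - n) % |modVal| = 0 := Int.emod_eq_zero_of_dvd hdvd
    have hd : (n - target) % |modVal| = 0 :=
      Int.emod_eq_zero_of_dvd ((dvd_sub_comm).mp hdvd)
    simp only [h0, not_true, if_false, hmodup, hmoddown, hu, hd]
    split <;> ring
  · have hfuel_u : (target - n) % |modVal| < ((modVal.natAbs : Nat) : Int) := by
      rw [hfuel]; exact Int.emod_lt_of_pos _ hm
    have hfuel_d : (n - target) % |modVal| < ((modVal.natAbs : Nat) : Int) := by
      rw [hfuel]; exact Int.emod_lt_of_pos _ hm
    simp only [h0, not_false_iff, if_true, hmodup, hmoddown]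
    split
    · exact pv_up_eq modVal target hb ht modVal.natAbs n hfuel_u
    · exact pv_down_eq modVal target hb ht modVal.natAbs n hfuel_d
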